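-- pv_equiv track=rewrite | github.com/jbah1/pdfocr | test_all_psm_modes.py | detect_columns_with_larger_gap
-- ===== SOURCE A (Python) =====
-- def detect_columns_with_larger_gap(lines, page_width, max_column_gap=300):
--     """Detect columns with a larger gap threshold."""
--     if not lines:
--         return []
--
--     # Sort lines by left position of first word
--     lines_sorted = sorted(lines, key=lambda line: line[0]['left'])
--
--     columns = []
--     current_column = []
--     last_right = -1
--
--     for line in lines_sorted:
--         line_left = line[0]['left']
--         line_right = line[-1]['right']
--
--         if current_column and (line_left - last_right > max_column_gap):
--             columns.append(current_column)
--             current_column = []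
--
--         current_column.extend(line)
--         last_right = line_right
--
--     if current_column:
--         columns.append(current_column)
--
--     return columns
-- ===== SOURCE B (Python) =====
-- def detect_columns_with_larger_gap(lines, page_width, max_column_gap=300):
--     """Detect columns with a larger gap threshold (recursive chunking rewrite)."""
--     lines_sorted = sorted(lines, key=lambda line: line[0]['left'])
--
--     def chunks(seq):
--         # split the sorted lines into maximal runs whose consecutive gap is small
--         if not seq:
--             return []
--         i = 1
--         while i < len(seq) and seq[i][0]['left'] - seq[i - 1][-1]['right'] <= max_column_gap:
--             i += 1
--         return [seq[:i]] + chunks(seq[i:])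
--
--     return [[word for line in chunk for word in line] for chunk in chunks(lines_sorted)]
-- ===== Notes on version B (the rewrite author's own statement) =====
-- stated objective: alternative
-- what changed: Replaces A's single fold carrying (columns, current_column, last_right) accumulator state with a recursive decomposition: split the sorted list into maximal small-gap runs (a while-scan plus slicing per run) and flatten each run into a column.
import Mathlib
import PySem

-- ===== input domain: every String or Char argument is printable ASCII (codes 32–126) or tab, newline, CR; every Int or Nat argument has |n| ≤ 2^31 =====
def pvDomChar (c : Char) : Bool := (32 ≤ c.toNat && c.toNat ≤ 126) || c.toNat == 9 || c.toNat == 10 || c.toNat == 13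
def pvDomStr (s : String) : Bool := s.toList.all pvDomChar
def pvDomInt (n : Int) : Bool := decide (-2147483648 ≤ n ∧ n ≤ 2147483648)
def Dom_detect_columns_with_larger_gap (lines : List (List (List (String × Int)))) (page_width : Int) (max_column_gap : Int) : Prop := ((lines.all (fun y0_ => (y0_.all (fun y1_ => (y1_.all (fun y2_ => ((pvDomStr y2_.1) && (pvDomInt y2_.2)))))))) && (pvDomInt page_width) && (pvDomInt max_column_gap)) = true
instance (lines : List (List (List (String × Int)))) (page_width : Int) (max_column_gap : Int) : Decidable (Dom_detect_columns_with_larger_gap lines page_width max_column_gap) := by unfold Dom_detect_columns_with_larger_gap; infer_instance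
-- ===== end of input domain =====

-- B regroups the sorted lines by recursive maximal-run chunking instead of A's single accumulator fold; objective: alternative decomposition, same cost.


-- ===== PORT A =====
-- line[0]['left']  (Pre_ guarantees the index and the key exist; getD 0 is never taken there)
def pvLineLeft (line : List (List (String × Int))) : Int :=
  ((PySem.Dict.mk ((PySem.List.pyGet? line 0).getD [])).get? "left").getD 0
-- line[-1]['right']
def pvLineRight (line : List (List (String × Int))) : Int :=
  ((PySem.Dict.mk ((PySem.List.pyGet? line (-1)).getD [])).get? "right").getD 0

def detect_columns_with_larger_gap (lines : List (List (List (String × Int)))) (page_width : Int) (max_column_gap : Int) : List (List (List (String × Int))) :=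
  if lines = [] then []
  else
    let lines_sorted := PySem.List.sorted lines (fun line => pvLineLeft line) false
    let st := lines_sorted.foldl
      (fun (st : List (List (List (String × Int))) × List (List (String × Int)) × Int) line =>
        let columns := st.1
        let current_column := st.2.1
        let last_right := st.2.2
        let line_left := pvLineLeft line
        let line_right := pvLineRight line
        let (columns, current_column) :=
          if current_column ≠ [] ∧ line_left - last_right > max_column_gap then
            (columns ++ [current_column], [])
          else (columns, current_column)
        (columns, current_column ++ line, line_right))
      ([], [], -1)
    if st.2.1 ≠ [] then st.1 ++ [st.2.1] else st.1

-- ===== PORT B =====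
-- length of the maximal run after `prev` whose consecutive gap stays ≤ max_column_gap (B's while loop)
def pvChunkLen (max_column_gap : Int) : List (List (String × Int)) → List (List (List (String × Int))) → Nat
  | _, [] => 0
  | prev, l :: rest =>
      if pvLineLeft l - pvLineRight prev ≤ max_column_gap then pvChunkLen max_column_gap l rest + 1
      else 0

-- B's recursive chunking of the sorted list
def pvChunks (max_column_gap : Int) : List (List (List (String × Int))) → List (List (List (List (String × Int))))
  | [] => []
  | l :: rest =>
      let n := pvChunkLen max_column_gap l rest
      (l :: rest.take n) :: pvChunks max_column_gap (rest.drop n)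
  termination_by seq => seq.length
  decreasing_by simp

def detect_columns_with_larger_gap_alt (lines : List (List (List (String × Int)))) (page_width : Int) (max_column_gap : Int) : List (List (List (String × Int))) :=
  let lines_sorted := PySem.List.sorted lines (fun line => pvLineLeft line) false
  (pvChunks max_column_gap lines_sorted).map (fun chunk => chunk.flatMap (fun line => line))

-- ===== PRECONDITION & SPEC =====
-- Pre_ excludes exactly the inputs where Python A raises: a line that is the empty list (IndexError on
-- line[0]) or whose first word lacks 'left' / last word lacks 'right' (KeyError).
def Pre_detect_columns_with_larger_gap (lines : List (List (List (String × Int)))) (page_width : Int) (max_column_gap : Int) : Prop :=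
  ∀ line ∈ lines, line ≠ [] ∧
    ((PySem.Dict.mk line.headI).get? "left").isSome = true ∧
    ((PySem.Dict.mk (line.getLastD [])).get? "right").isSome = true
instance (lines : List (List (List (String × Int)))) (page_width : Int) (max_column_gap : Int) : Decidable (Pre_detect_columns_with_larger_gap lines page_width max_column_gap) := by unfold Pre_detect_columns_with_larger_gap; infer_instance

def pvWitness_detect_columns_with_larger_gap : (List (List (List (String × Int)))) × Int × Int :=
  ([[[("left", 0), ("right", 50)]], [[("left", 400), ("right", 450)]]], 500, 300)

def Spec_detect_columns_with_larger_gap (lines : List (List (List (String × Int)))) (page_width : Int) (max_column_gap : Int) (out : List (List (List (String × Int)))) : Prop := out = detect_columns_with_larger_gap_alt lines page_width max_column_gap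
instance (lines : List (List (List (String × Int)))) (page_width : Int) (max_column_gap : Int) (out : List (List (List (String × Int)))) : Decidable (Spec_detect_columns_with_larger_gap lines page_width max_column_gap out) := by unfold Spec_detect_columns_with_larger_gap; infer_instance

-- ===== CLAIM (what is proved, stated in full; the proofs are below) =====
def Claim_equal_detect_columns_with_larger_gap : Prop := ∀ (lines : List (List (List (String × Int)))) (page_width : Int) (max_column_gap : Int), Dom_detect_columns_with_larger_gap lines page_width max_column_gap → Pre_detect_columns_with_larger_gap lines page_width max_column_gap → Spec_detect_columns_with_larger_gap lines page_width max_column_gap (detect_columns_with_larger_gap lines page_width max_column_gap)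

-- ===== LEMMAS AND PROOFS =====

theorem pvWitness_ok : Dom_detect_columns_with_larger_gap pvWitness_detect_columns_with_larger_gap.1 pvWitness_detect_columns_with_larger_gap.2.1 pvWitness_detect_columns_with_larger_gap.2.2 ∧ Pre_detect_columns_with_larger_gap pvWitness_detect_columns_with_larger_gap.1 pvWitness_detect_columns_with_larger_gap.2.1 pvWitness_detect_columns_with_larger_gap.2.2 := by
  decide

-- A's loop, abstracted
def pvStep (gap : Int) (st : List (List (List (String × Int))) × List (List (String × Int)) × Int)
    (line : List (List (String × Int))) : List (List (List (String × Int))) × List (List (String × Int)) × Int :=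
  let (columns, current_column) :=
    if st.2.1 ≠ [] ∧ pvLineLeft line - st.2.2 > gap then (st.1 ++ [st.2.1], []) else (st.1, st.2.1)
  (columns, current_column ++ line, pvLineRight line)

def pvFinish (st : List (List (List (String × Int))) × List (List (String × Int)) × Int) : List (List (List (String × Int))) :=
  if st.2.1 ≠ [] then st.1 ++ [st.2.1] else st.1

theorem pvChunks_nil (gap : Int) : pvChunks gap [] = [] := by
  rw [pvChunks]

theorem pvChunks_cons (gap : Int) (l : List (List (String × Int))) (rest : List (List (List (String × Int)))) :
    pvChunks gap (l :: rest) = (l :: rest.take (pvChunkLen gap l rest)) :: pvChunks gap (rest.drop (pvChunkLen gap l rest)) := by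
  rw [pvChunks]

theorem pvStep_le (gap : Int) (st : List (List (List (String × Int))) × List (List (String × Int)) × Int)
    (line : List (List (String × Int))) (h : ¬ pvLineLeft line - st.2.2 > gap) :
    pvStep gap st line = (st.1, st.2.1 ++ line, pvLineRight line) := by
  have hc : ¬ (st.2.1 ≠ [] ∧ pvLineLeft line - st.2.2 > gap) := fun hx => h hx.2
  simp only [pvStep]
  rw [if_neg hc]

theorem pvStep_empty (gap : Int) (st : List (List (List (String × Int))) × List (List (String × Int)) × Int)
    (line : List (List (String × Int))) (h : st.2.1 = []) :
    pvStep gap st line = (st.1, st.2.1 ++ line, pvLineRight line) := by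
  have hc : ¬ (st.2.1 ≠ [] ∧ pvLineLeft line - st.2.2 > gap) := fun hx => hx.1 h
  simp only [pvStep]
  rw [if_neg hc]

theorem pvStep_gt (gap : Int) (st : List (List (List (String × Int))) × List (List (String × Int)) × Int)
    (line : List (List (String × Int))) (hcur : st.2.1 ≠ []) (h : pvLineLeft line - st.2.2 > gap) :
    pvStep gap st line = (st.1 ++ [st.2.1], [] ++ line, pvLineRight line) := by
  simp only [pvStep]
  rw [if_pos ⟨hcur, h⟩]

theorem pv_loop_eq (gap : Int) (seq : List (List (List (String × Int))))
    (hne : ∀ l ∈ seq, l ≠ []) :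
    ∀ (p : List (List (String × Int))) (cols : List (List (List (String × Int)))) (cur : List (List (String × Int))), cur ≠ [] →
    pvFinish (seq.foldl (pvStep gap) (cols, cur, pvLineRight p)) =
      cols ++ ((cur ++ (seq.take (pvChunkLen gap p seq)).flatMap (fun line => line)) ::
        (pvChunks gap (seq.drop (pvChunkLen gap p seq))).map (fun chunk => chunk.flatMap (fun line => line))) := by
  induction seq with
  | nil =>
      intro p cols cur hcur
      simp [pvFinish, pvChunkLen, pvChunks_nil, hcur]
  | cons l rest ih =>
      intro p cols cur hcur
      have hl : l ≠ [] := hne l (by simp)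
      have hrest : ∀ x ∈ rest, x ≠ [] := fun x hx => hne x (by simp [hx])
      by_cases h : pvLineLeft l - pvLineRight p ≤ gap
      · have hstep : pvStep gap (cols, cur, pvLineRight p) l = (cols, cur ++ l, pvLineRight l) :=
          pvStep_le gap _ l (by simp; omega)
        have := ih hrest l cols (cur ++ l) (by simp [hcur])
        simp only [List.foldl_cons, hstep, this]
        have hcl : pvChunkLen gap p (l :: rest) = pvChunkLen gap l rest + 1 := by
          simp [pvChunkLen, h]
        simp [hcl]
      · have hstep : pvStep gap (cols, cur, pvLineRight p) l = (cols ++ [cur], [] ++ l, pvLineRight l) :=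
          pvStep_gt gap _ l hcur (by simp; omega)
        have := ih hrest l (cols ++ [cur]) ([] ++ l) (by simpa using hl)
        simp only [List.foldl_cons, hstep, this]
        have hcl : pvChunkLen gap p (l :: rest) = 0 := by simp [pvChunkLen, h]
        simp [hcl, pvChunks_cons]

-- ===== VERDICT (by name: the statement is the Claim_ definition above) =====
theorem detect_columns_with_larger_gap_spec : Claim_equal_detect_columns_with_larger_gap := by
  intro lines page_width max_column_gap _dom hpre
  unfold Spec_detect_columns_with_larger_gap detect_columns_with_larger_gap detect_columns_with_larger_gap_alt
  by_cases hnil : lines = []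
  · subst hnil
    simp [pvChunks_nil, PySem.List.sorted]
  · simp only [hnil]
    have hsne : PySem.List.sorted lines (fun line => pvLineLeft line) false ≠ [] := by
      simp [PySem.List.sorted_eq_nil_iff, hnil]
    obtain ⟨m, t, hmt⟩ := List.exists_cons_of_ne_nil hsne
    have hmem : ∀ x ∈ PySem.List.sorted lines (fun line => pvLineLeft line) false, x ≠ [] := by
      intro x hx
      exact (hpre x ((PySem.List.mem_sorted _ _ _ _).mp hx)).1
    have hm : m ≠ [] := hmem m (by rw [hmt]; simp)
    have ht : ∀ x ∈ t, x ≠ [] := fun x hx => hmem x (by rw [hmt]; simp [hx])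
    rw [hmt]
    have hfirst : pvStep max_column_gap ([], [], -1) m = ([], [] ++ m, pvLineRight m) :=
      pvStep_empty max_column_gap ([], [], -1) m rfl
    have hloop := pv_loop_eq max_column_gap t ht m [] ([] ++ m) (by simpa using hm)
    simp only [List.foldl_cons]
    show pvFinish (t.foldl (pvStep max_column_gap) ([], [] ++ m, pvLineRight m)) = _
    rw [hloop]
    simp [pvChunks_cons]
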